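-- pv_equiv track=rewrite | github.com/nebulosa2007/EulerProject | python/euler11.py | product_multiply
-- ===== SOURCE A (Python) =====
-- from typing import List, Optional
--
-- def product_multiply(matrix: List[List[int]], n: int) -> List[int]:
--     """
--     Возвращает список произведений n элементов в строках матрицы.
--
--     Args:
--         matrix: Матрица чисел.
--         n: Количество элементов для перемножения.
--
--     Returns:
--         Список произведений.
--     """
--     product = []
--     for i in range(len(matrix[0]) - n + 1):
--         for j in range(len(matrix)):
--             num = 1
--             for k in range(n):
--                 num *= matrix[j][i + k]
--             product.append(num)
--     return product
-- ===== SOURCE B (Python) =====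
-- from typing import List
--
-- def _window_products(row: List[int], cols: int, n: int) -> List[int]:
--     outs = []
--     prod, zeros = 1, 0
--     for i in range(cols):
--         x = row[i]
--         if x == 0:
--             zeros += 1
--         else:
--             prod *= x
--         if i >= n:
--             y = row[i - n]
--             if y == 0:
--                 zeros -= 1
--             else:
--                 prod //= y
--         if i >= n - 1:
--             outs.append(prod if zeros == 0 else 0)
--     return outs
--
-- def product_multiply(matrix: List[List[int]], n: int) -> List[int]:
--     cols = len(matrix[0])
--     w = cols - n + 1
--     if w <= 0:
--         return []
--     if n <= 0:
--         return [1] * (w * len(matrix))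
--     per_row = [_window_products(row, cols, n) for row in matrix]
--     return [p[i] for i in range(w) for p in per_row]
-- ===== Notes on version B (the rewrite author's own statement) =====
-- stated objective: alternative
-- what changed: B replaces A's column-major triple loop (recomputing each n-element window product from scratch) with a per-row single-pass sliding-window running product that tracks a zero count and divides out the departing element, then interleaves the per-row results in A's output order.
import Mathlib
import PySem

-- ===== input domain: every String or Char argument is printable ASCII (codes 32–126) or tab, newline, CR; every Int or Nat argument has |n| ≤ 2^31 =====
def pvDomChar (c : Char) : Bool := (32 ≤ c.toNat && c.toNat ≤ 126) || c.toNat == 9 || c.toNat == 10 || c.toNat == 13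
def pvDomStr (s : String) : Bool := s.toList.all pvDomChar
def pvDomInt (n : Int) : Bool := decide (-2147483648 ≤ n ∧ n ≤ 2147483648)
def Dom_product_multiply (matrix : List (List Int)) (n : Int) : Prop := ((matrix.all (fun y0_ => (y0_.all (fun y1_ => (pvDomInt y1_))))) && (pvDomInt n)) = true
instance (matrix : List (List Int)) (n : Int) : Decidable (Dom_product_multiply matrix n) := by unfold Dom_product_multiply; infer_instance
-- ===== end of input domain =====

-- B replaces A's column-major triple loop by a per-row single-pass sliding-window
-- running product with zero-count tracking, interleaved back into A's output order.

-- ===== PORT A =====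
def product_multiply (matrix : List (List Int)) (n : Int) : List Int :=
  (PySem.List.pyRange 0 (((PySem.List.pyGetD matrix 0 []).length : Int) - n + 1) 1).foldl
    (fun product i =>
      (PySem.List.pyRange 0 (matrix.length : Int) 1).foldl
        (fun product j =>
          product ++ [(PySem.List.pyRange 0 n 1).foldl
            (fun num k => num * PySem.List.pyGetD (PySem.List.pyGetD matrix j []) (i + k) 0) 1])
        product)
    []

-- ===== PORT B =====
def pvWindowProducts (row : List Int) (cols n : Int) : List Int :=
  ((PySem.List.pyRange 0 cols 1).foldl
    (fun (s : List Int × Int × Int) i =>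
      let outs := s.1
      let prod := s.2.1
      let zeros := s.2.2
      let x := PySem.List.pyGetD row i 0
      let pz : Int × Int := if x = 0 then (prod, zeros + 1) else (prod * x, zeros)
      let pz2 : Int × Int :=
        if n ≤ i then
          let y := PySem.List.pyGetD row (i - n) 0
          if y = 0 then (pz.1, pz.2 - 1) else (PySem.Int.floordiv pz.1 y, pz.2)
        else pz
      let outs2 := if n - 1 ≤ i then outs ++ [if pz2.2 = 0 then pz2.1 else 0] else outs
      (outs2, pz2.1, pz2.2))
    ([], 1, 0)).1

def product_multiply_alt (matrix : List (List Int)) (n : Int) : List Int :=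
  let cols : Int := ((PySem.List.pyGetD matrix 0 []).length : Int)
  let w : Int := cols - n + 1
  if w ≤ 0 then []
  else if n ≤ 0 then List.replicate (w * (matrix.length : Int)).toNat 1
  else
    let per_row := matrix.map (fun row => pvWindowProducts row cols n)
    (PySem.List.pyRange 0 w 1).flatMap (fun i => per_row.map (fun p => PySem.List.pyGetD p i 0))

-- ===== PRECONDITION & SPEC =====
-- Pre_ excludes exactly the inputs on which A raises: the empty matrix (matrix[0] is an
-- IndexError) and, when 1 ≤ n ≤ len(matrix[0]), a row shorter than the first row
-- (matrix[j][i+k] is an IndexError); A returns on every other input.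
def Pre_product_multiply (matrix : List (List Int)) (n : Int) : Prop :=
  matrix ≠ [] ∧
    ((1 ≤ n ∧ n ≤ ((matrix.headD []).length : Int)) →
      ∀ row ∈ matrix, (matrix.headD []).length ≤ row.length)
instance (matrix : List (List Int)) (n : Int) : Decidable (Pre_product_multiply matrix n) := by
  unfold Pre_product_multiply; infer_instance

def pvWitness_product_multiply : List (List Int) × Int := ([[1, 2, 0, 4], [5, -6, 7, 8]], 2)

def Spec_product_multiply (matrix : List (List Int)) (n : Int) (out : List Int) : Prop := out = product_multiply_alt matrix n
instance (matrix : List (List Int)) (n : Int) (out : List Int) : Decidable (Spec_product_multiply matrix n out) := by unfold Spec_product_multiply; infer_instance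

-- ===== CLAIM (what is proved, stated in full; the proofs are below) =====
def Claim_equal_product_multiply : Prop := ∀ (matrix : List (List Int)) (n : Int), Dom_product_multiply matrix n → Pre_product_multiply matrix n → Spec_product_multiply matrix n (product_multiply matrix n)

-- ===== LEMMAS AND PROOFS =====

-- ===== LEMMAS AND PROOFS =====

-- the loop body of pvWindowProducts, named for the proofs
def pvStep (row : List Int) (n : Int) (s : List Int × Int × Int) (i : Int) : List Int × Int × Int :=
  let outs := s.1
  let prod := s.2.1
  let zeros := s.2.2
  let x := PySem.List.pyGetD row i 0
  let pz : Int × Int := if x = 0 then (prod, zeros + 1) else (prod * x, zeros)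
  let pz2 : Int × Int :=
    if n ≤ i then
      let y := PySem.List.pyGetD row (i - n) 0
      if y = 0 then (pz.1, pz.2 - 1) else (PySem.Int.floordiv pz.1 y, pz.2)
    else pz
  let outs2 := if n - 1 ≤ i then outs ++ [if pz2.2 = 0 then pz2.1 else 0] else outs
  (outs2, pz2.1, pz2.2)

lemma pvWindowProducts_eq_foldl (row : List Int) (cols n : Int) :
    pvWindowProducts row cols n
      = ((PySem.List.pyRange 0 cols 1).foldl (pvStep row n) ([], 1, 0)).1 := rfl

-- "prod if zeros == 0 else 0" recovers the plain product of the window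
lemma pvIfZeroProd (w : List Int) :
    (if ((w.count 0 : Int)) = 0 then (w.filter (fun a => a ≠ 0)).prod else 0) = w.prod := by
  by_cases h : w.count 0 = 0
  · have h0 : ∀ a ∈ w, a ≠ 0 := fun a ha he => by
      subst he; exact absurd h (by simp [List.count_eq_zero, ha])
    rw [List.filter_eq_self.mpr (by intro a ha; simpa using h0 a ha)]
    simp [h]
  · have h0 : (0:Int) ∈ w := by
      by_contra hmem
      exact h (List.count_eq_zero.mpr hmem)
    rw [List.prod_eq_zero h0]
    simp only [Int.natCast_eq_zero, h, if_false]

-- A's innermost loop equals the product of the length-n slice starting at I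
lemma pvInnerA (row : List Int) (I N : Nat) (h : I + N ≤ row.length) :
    (PySem.List.pyRange 0 (N : Int) 1).foldl
      (fun num k => num * PySem.List.pyGetD row ((I : Int) + k) 0) 1
      = ((row.drop I).take N).prod := by
  induction N with
  | zero => simp [PySem.List.pyRange_one_eq_nil]
  | succ m ih =>
      have hle : I + m ≤ row.length := by omega
      have hcast : ((m + 1 : Nat) : Int) = (m : Int) + 1 := by push_cast; ring
      rw [hcast, PySem.List.pyRange_one_succ_right (by positivity), List.foldl_append, ih hle]
      have hidx : I + m < row.length := by omega
      have h1 : (PySem.List.pyGetD row ((I : Int) + (m : Int)) 0) = row[I + m] := by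
        rw [show ((I : Int) + (m : Int)) = ((I + m : Nat) : Int) by push_cast; ring,
          PySem.List.pyGetD_natCast, List.getD_eq_getElem row 0 hidx]
      have h2 : (row.drop I).take (m + 1) = (row.drop I).take m ++ [row[I + m]] := by
        rw [List.take_add_one]
        have : (row.drop I)[m]? = some row[I + m] := by
          rw [List.getElem?_drop, List.getElem?_eq_getElem hidx]
        simp [this]
      simp [h1, h2]

-- the sliding-window invariant of pvWindowProducts' loop
lemma pvSlideInv (row : List Int) (C N : Nat) (hN : 1 ≤ N) (hC : C ≤ row.length) :
    ∀ i, i ≤ C →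
      (PySem.List.pyRange 0 (i : Int) 1).foldl (pvStep row (N : Int)) ([], 1, 0)
        = ((List.range (i - (N - 1))).map (fun s => ((row.drop s).take N).prod),
           (((row.take i).drop (i - N)).filter (fun a => a ≠ 0)).prod,
           (((row.take i).drop (i - N)).count 0 : Int)) := by
  obtain ⟨M, rfl⟩ : ∃ M, N = M + 1 := ⟨N - 1, by omega⟩
  intro i
  induction i with
  | zero =>
      intro _
      simp [PySem.List.pyRange_one_eq_nil]
  | succ i ih =>
      intro hiC
      have hi : i ≤ C := Nat.le_of_succ_le hiC
      have hilen : i < row.length := by omega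
      have hcast : ((i + 1 : Nat) : Int) = (i : Int) + 1 := by push_cast; ring
      rw [hcast, PySem.List.pyRange_one_succ_right (by positivity), List.foldl_append,
        ih hi, List.foldl_cons, List.foldl_nil]
      have hx : PySem.List.pyGetD row ((i : Int)) 0 = row[i] := by
        rw [PySem.List.pyGetD_natCast, List.getD_eq_getElem row 0 hilen]
      by_cases hNi : M + 1 ≤ i
      · -- sliding case: one element leaves the window
        have hyidx : i - (M + 1) < row.length := by omega
        have hyc : ((i : Int) - ((M : Int) + 1)) = ((i - (M + 1) : Nat) : Int) := by omega
        have hy : PySem.List.pyGetD row ((i : Int) - ((M + 1 : Nat) : Int)) 0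
            = row[i - (M + 1)] := by
          rw [show (((M + 1 : Nat)) : Int) = (M : Int) + 1 by push_cast; ring, hyc,
            PySem.List.pyGetD_natCast, List.getD_eq_getElem row 0 hyidx]
        have hcond : (((M + 1 : Nat)) : Int) ≤ (i : Int) := by exact_mod_cast hNi
        have hc2 : (((M + 1 : Nat)) : Int) - 1 ≤ (i : Int) := by push_cast; omega
        have hwinI : (row.take i).drop (i - (M + 1))
            = row[i - (M + 1)] :: (row.drop (i - (M + 1) + 1)).take M := by
          rw [List.drop_take, List.drop_eq_getElem_cons hyidx,
            show i - (i - (M + 1)) = M + 1 by omega, List.take_succ_cons]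
        have hmidq : (row.drop (i - (M + 1) + 1))[M]? = some row[i] := by
          rw [List.getElem?_drop, show i - (M + 1) + 1 + M = i by omega,
            List.getElem?_eq_getElem hilen]
        have hwinI1 : (row.take (i + 1)).drop (i + 1 - (M + 1))
            = (row.drop (i - (M + 1) + 1)).take M ++ [row[i]] := by
          rw [List.drop_take, show i + 1 - (i + 1 - (M + 1)) = M + 1 by omega,
            show i + 1 - (M + 1) = i - (M + 1) + 1 by omega, List.take_add_one, hmidq]
          rfl
        have hrng : i + 1 - (M + 1 - 1) = (i - (M + 1 - 1)) + 1 := by omega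
        have hfnew : i - (M + 1 - 1) = i - (M + 1) + 1 := by omega
        have htakeNmid : (row.drop (i - (M + 1) + 1)).take (M + 1)
            = (row.take (i + 1)).drop (i + 1 - (M + 1)) := by
          rw [List.drop_take, show i + 1 - (i + 1 - (M + 1)) = M + 1 by omega,
            show i + 1 - (M + 1) = i - (M + 1) + 1 by omega]
        simp only [pvStep, hx, hy, if_pos hcond, if_pos hc2, hwinI, hwinI1, hrng,
          List.range_succ, List.map_append, List.map_cons, List.map_nil, hfnew,
          htakeNmid]
        set mid := (row.drop (i - (M + 1) + 1)).take M with hmid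
        have helem : ∀ v : Int, (if ((mid ++ [v]).count 0 : Int) = 0
              then ((mid ++ [v]).filter (fun a => a ≠ 0)).prod else 0)
            = (mid ++ [v]).prod := fun v => pvIfZeroProd _
        rw [← helem row[i]]
        by_cases hy0 : row[i - (M + 1)] = (0:Int)
        · by_cases hx0 : row[i] = (0:Int)
          · simp [hy0, hx0, List.filter_cons, List.count_cons, List.filter_append,
              List.count_append, Prod.ext_iff]
          · simp [hy0, hx0, List.filter_cons, List.count_cons, List.filter_append,
              List.count_append, Prod.ext_iff]
        · have hfd : ∀ t : Int, PySem.Int.floordiv (row[i - (M + 1)] * t) row[i - (M + 1)] = t :=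
            fun t => Int.mul_fdiv_cancel_left t hy0
          by_cases hx0 : row[i] = (0:Int)
          · simp [hy0, hx0, List.filter_cons, List.count_cons, List.filter_append,
              List.count_append, List.prod_append, List.prod_cons, mul_assoc, hfd,
              Prod.ext_iff]
          · simp [hy0, hx0, List.filter_cons, List.count_cons, List.filter_append,
              List.count_append, List.prod_append, List.prod_cons, mul_assoc, hfd,
              Prod.ext_iff]
      · -- growing case: window not yet full
        have hwin : (row.take i).drop (i - (M + 1)) = row.take i := by
          rw [show i - (M + 1) = 0 by omega, List.drop_zero]
        have htake : row.take (i + 1) = row.take i ++ [row[i]] := by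
          rw [List.take_add_one, List.getElem?_eq_getElem hilen]; rfl
        have hwin' : (row.take (i + 1)).drop (i + 1 - (M + 1)) = row.take i ++ [row[i]] := by
          rw [show i + 1 - (M + 1) = 0 by omega, List.drop_zero, htake]
        have hcond : ¬ ((((M + 1 : Nat)) : Int) ≤ (i : Int)) := by exact_mod_cast hNi
        simp only [pvStep, hx, hcond, if_false, hwin, hwin']
        have hfilt : ((row.take (i + 1)).filter (fun a => a ≠ 0)).prod
            = ((row.take i).filter (fun a => a ≠ 0)).prod * (if row[i] = 0 then 1 else row[i]) := by
          rw [htake, List.filter_append]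
          by_cases hx0 : row[i] = (0:Int) <;> simp [hx0]
        have hcnt : ((row.take (i + 1)).count 0 : Int)
            = ((row.take i).count 0 : Int) + (if row[i] = 0 then 1 else 0) := by
          rw [htake, List.count_append]
          by_cases hx0 : row[i] = (0:Int) <;> simp [hx0] <;> push_cast <;> ring
        by_cases hN1 : M + 1 = i + 1
        · have hc2 : (((M + 1 : Nat)) : Int) - 1 ≤ (i : Int) := by push_cast; omega
          have hr1 : i - (M + 1 - 1) = 0 := by omega
          have hr2 : i + 1 - (M + 1 - 1) = 1 := by omega
          rw [if_pos hc2, hr1, hr2, List.range_one]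
          have hdrop : (row.drop 0).take (M + 1) = row.take (i + 1) := by
            rw [List.drop_zero, hN1]
          have helem : (if (((row.take (i + 1)).count 0 : Int)) = 0
                then (((row.take (i + 1)).filter (fun a => a ≠ 0))).prod else 0)
              = (row.take (i + 1)).prod := pvIfZeroProd _
          simp only [List.map_cons, List.map_nil, List.range_zero, hdrop, Prod.ext_iff,
            ← helem]
          by_cases hx0 : row[i] = (0:Int)
          · simp [hx0, List.filter_append, List.count_append]
            have hc' : List.count (0:Int) (List.take (i+1) row)
                = List.count 0 (List.take i row) + 1 := by
              rw [htake, List.count_append]; simp [hx0]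
            rw [hc', if_neg (by positivity), if_neg (by omega)]
          · have h1 : (List.filter (fun a => !decide (a = 0)) (List.take (i+1) row)).prod
                = (List.filter (fun a => !decide (a = 0)) (List.take i row)).prod * row[i] := by
              rw [htake, List.filter_append]; simp [hx0]
            have h2 : List.count (0:Int) (List.take (i+1) row) = List.count 0 (List.take i row) := by
              rw [htake, List.count_append]; simp [hx0]
            simp [hx0, List.filter_append, List.count_append, h1, h2]
        · have hc2 : ¬ ((((M + 1 : Nat)) : Int) - 1 ≤ (i : Int)) := by push_cast; omega
          have hr1 : i - (M + 1 - 1) = 0 := by omega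
          have hr2 : i + 1 - (M + 1 - 1) = 0 := by omega
          rw [if_neg hc2, hr1, hr2]
          by_cases hx0 : row[i] = (0:Int)
          · simp [hx0, Prod.ext_iff, List.filter_append, List.count_append]
          · have h1 : (List.filter (fun a => !decide (a = 0)) (List.take (i+1) row)).prod
                = (List.filter (fun a => !decide (a = 0)) (List.take i row)).prod * row[i] := by
              rw [htake, List.filter_append]; simp [hx0]
            have h2 : List.count (0:Int) (List.take (i+1) row) = List.count 0 (List.take i row) := by
              rw [htake, List.count_append]; simp [hx0]
            simp [hx0, Prod.ext_iff, List.filter_append, List.count_append, h1, h2]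

lemma pvWindowProducts_eq (row : List Int) (C N : Nat) (hN : 1 ≤ N) (hNC : N ≤ C)
    (hC : C ≤ row.length) :
    pvWindowProducts row (C : Int) (N : Int)
      = (List.range (C - N + 1)).map (fun s => ((row.drop s).take N).prod) := by
  rw [pvWindowProducts_eq_foldl, pvSlideInv row C N hN hC C le_rfl]
  have h : C - (N - 1) = C - N + 1 := by omega
  rw [h]

lemma pvMapRows {α : Type} (xs : List (List Int)) (F : List Int → α) :
    (PySem.List.pyRange 0 (xs.length : Int) 1).map
        (fun j => F (PySem.List.pyGetD xs j [])) = xs.map F := by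
  rw [show (fun j => F (PySem.List.pyGetD xs j []))
        = F ∘ (fun j => PySem.List.pyGetD xs j []) from rfl,
    ← List.map_map, PySem.List.map_pyGetD_pyRange_zero']

lemma pvFlattenRepl (W R : Nat) :
    (List.replicate W (List.replicate R (1:Int))).flatten = List.replicate (W * R) 1 := by
  induction W with
  | zero => simp
  | succ w ih =>
      rw [List.replicate_succ, List.flatten_cons, ih, Nat.succ_mul, Nat.add_comm,
        List.replicate_add]

-- ===== VERDICT (by name: the statement is the Claim_ definition above) =====
theorem product_multiply_spec : Claim_equal_product_multiply := by
  intro matrix n _hdom hpre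
  obtain ⟨hne, hrows⟩ := hpre
  obtain ⟨r0, rest, rfl⟩ : ∃ r0 rest, matrix = r0 :: rest := by
    cases matrix with
    | nil => exact absurd rfl hne
    | cons a l => exact ⟨a, l, rfl⟩
  unfold Spec_product_multiply product_multiply product_multiply_alt
  rw [List.headD_cons] at hrows
  simp only [PySem.List.pyGetD_zero_cons]
  by_cases hn0 : n ≤ 0
  · -- n ≤ 0: every window product is the empty product 1
    have hw : ¬ ((r0.length : Int) - n + 1 ≤ 0) := by omega
    have hw0 : 0 ≤ (r0.length : Int) - n + 1 := by omega
    rw [if_neg hw, if_pos hn0, PySem.List.pyRange_one_eq_nil (a := 0) (b := n) hn0]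
    simp only [List.foldl_nil, PySem.List.foldl_append_singleton_eq_map,
      PySem.List.foldl_append_eq_flatMap, List.nil_append, List.flatMap_def,
      List.map_const', PySem.List.length_pyRange_one, sub_zero]
    rw [pvFlattenRepl]
    congr 1
    have hm : ((r0.length : Int) - n + 1) * (((r0 :: rest).length : Nat) : Int)
        = ((((r0.length : Int) - n + 1).toNat * (r0 :: rest).length : Nat) : Int) := by
      push_cast [Int.toNat_of_nonneg hw0]
      ring
    rw [hm]
    exact (Int.toNat_natCast _).symm
  · push_neg at hn0
    by_cases hnC : (r0.length : Int) < n
    · -- window longer than a row: no windows at all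
      have hw : ((r0.length : Int) - n + 1 ≤ 0) := by omega
      rw [if_pos hw, PySem.List.pyRange_one_eq_nil hw, List.foldl_nil]
    · -- main case: 1 ≤ n ≤ len(matrix[0])
      push_neg at hnC
      have hrows' : ∀ row ∈ r0 :: rest, r0.length ≤ row.length := hrows ⟨hn0, hnC⟩
      obtain ⟨N, rfl⟩ : ∃ N : Nat, n = (N : Int) := ⟨n.toNat, by omega⟩
      have hN1 : 1 ≤ N := by exact_mod_cast hn0
      have hNC : N ≤ r0.length := by exact_mod_cast hnC
      have hw : ¬ ((r0.length : Int) - (N : Int) + 1 ≤ 0) := by omega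
      rw [if_neg hw, if_neg (by omega)]
      simp only [PySem.List.foldl_append_singleton_eq_map,
        PySem.List.foldl_append_eq_flatMap, List.nil_append, List.map_map]
      refine List.flatMap_congr ?_
      intro i hi
      rw [PySem.List.mem_pyRange_one] at hi
      have hmid : (PySem.List.pyRange 0 (((r0 :: rest).length : Nat) : Int) 1).map
            (fun j => List.foldl
              (fun num k => num * PySem.List.pyGetD (PySem.List.pyGetD (r0 :: rest) j []) (i + k) 0)
              1 (PySem.List.pyRange 0 (N : Int) 1))
          = (r0 :: rest).map
            (fun row => List.foldl
              (fun num k => num * PySem.List.pyGetD row (i + k) 0)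
              1 (PySem.List.pyRange 0 (N : Int) 1)) :=
        pvMapRows (r0 :: rest)
          (fun row => List.foldl (fun num k => num * PySem.List.pyGetD row (i + k) 0)
            1 (PySem.List.pyRange 0 (N : Int) 1))
      rw [hmid]
      obtain ⟨I, rfl⟩ : ∃ I : Nat, i = (I : Int) := ⟨i.toNat, by omega⟩
      have hIw : I < r0.length - N + 1 := by omega
      refine List.map_congr_left ?_
      intro row hrow
      have hlen : r0.length ≤ row.length := hrows' row hrow
      have hIN : I + N ≤ row.length := by omega
      simp only [Function.comp]
      rw [pvInnerA row I N hIN,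
        pvWindowProducts_eq row r0.length N hN1 hNC hlen,
        PySem.List.pyGetD_natCast,
        PySem.List.getD_map_range _ _ _ _ hIw]
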